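-- pv_equiv track=rewrite | github.com/FelipeHanada/Kayles-Caterpillar | pythonscripts/tabela_path.py | break_table
-- ===== SOURCE A (Python) =====
-- def break_table(table, max_rows):
--     rtable = [[] for _ in range(max_rows)]
--     for i, row in enumerate(table[1:]):
--         rtable[i % max_rows] += row
--
--     rtable.insert(0, [])
--     while len(rtable[0]) < len(rtable[1]):
--         rtable[0] += table[0]
--
--     for i in range(len(rtable)):
--         rtable[i] += ["" for _ in range(len(rtable[0]) - len(rtable[i]))]
--
--     return rtable
-- ===== SOURCE B (Python) =====
-- def break_table(table, max_rows):
--     # gather strided slices into buckets; closed-form (ceil-division) header; pad to header width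
--     buckets = [sum(table[1 + k::max_rows], []) for k in range(max_rows)]
--     L = len(buckets[0]) if buckets else 0
--     if L > 0:
--         n = -(-L // len(table[0]))
--         header = table[0] * n
--     else:
--         header = []
--     width = len(header)
--     return [row + [""] * (width - len(row)) for row in [header] + buckets]
-- ===== Notes on version B (the rewrite author's own statement) =====
-- stated objective: idiomatic
-- what changed: B builds each bucket by gathering a strided slice table[1+k::max_rows] instead of A's scatter loop with i % max_rows indexing, and replaces A's while-append header loop with a closed-form ceiling division (header = table[0] * ceil(L/len(table[0]))).
import Mathlib
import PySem

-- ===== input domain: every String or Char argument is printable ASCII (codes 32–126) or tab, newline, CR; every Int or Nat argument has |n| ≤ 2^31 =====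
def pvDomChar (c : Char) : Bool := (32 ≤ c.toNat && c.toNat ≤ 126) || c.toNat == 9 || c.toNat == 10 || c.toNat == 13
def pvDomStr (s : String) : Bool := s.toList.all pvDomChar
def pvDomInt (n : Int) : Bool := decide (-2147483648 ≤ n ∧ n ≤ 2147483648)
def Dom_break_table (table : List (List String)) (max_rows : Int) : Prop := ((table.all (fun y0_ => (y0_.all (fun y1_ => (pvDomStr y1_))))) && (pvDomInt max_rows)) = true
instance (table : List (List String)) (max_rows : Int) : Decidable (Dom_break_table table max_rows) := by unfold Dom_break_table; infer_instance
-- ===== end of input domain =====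

-- B gathers each bucket as a strided slice and computes the header by ceiling division instead of
-- A's scatter loop and while-append loop (objective: different decomposition / idiomatic).

-- ===== PORT A =====
-- A's loop body: rtable[i % max_rows] += row (in range under Pre_, where 1 ≤ max_rows)
def pvScatA (m : Int) (rt : List (List String)) (p : Int × List String) : List (List String) :=
  PySem.List.pySetD rt (PySem.Int.mod p.1 m)
    (PySem.List.pyGetD rt (PySem.Int.mod p.1 m) [] ++ p.2)

-- A's while loop 'while len(rtable[0]) < L: rtable[0] += table[0]'; the fuel only makes it total
-- (when table[0] is empty and L > 0 the Python diverges; Pre_ excludes exactly that)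
def pvHdrA (row0 : List String) (L : Nat) : Nat → List String → List String
  | 0, hdr => hdr
  | fuel+1, hdr => if hdr.length < L then pvHdrA row0 L fuel (hdr ++ row0) else hdr

def break_table (table : List (List String)) (max_rows : Int) : List (List String) :=
  let rt := (PySem.List.enumerate table.tail 0).foldl (pvScatA max_rows) (List.replicate max_rows.toNat [])
  let L := (rt.getD 0 []).length              -- len(rtable[1]) after rtable.insert(0, []) (in range under Pre_)
  let hdr := pvHdrA (table.headD []) L L []
  let rt2 := hdr :: rt
  rt2.map (fun r => r ++ List.replicate ((rt2.headD []).length - r.length) "")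

-- ===== PORT B =====
-- B's strided slice table[1+k::max_rows] = drop (1+k), then every m-th element
-- (exact for start ≥ 0 and step ≥ 1; B evaluates it only for 0 ≤ k < max_rows)
def pvEvery (m : Nat) : List (List String) → List (List String)
  | [] => []
  | r :: rs => r :: pvEvery m (rs.drop (m - 1))
termination_by l => l.length
decreasing_by simp

def break_table_alt (table : List (List String)) (max_rows : Int) : List (List String) :=
  let buckets := (List.range max_rows.toNat).map
    (fun k => (pvEvery max_rows.toNat (table.drop (1 + k))).flatten)
  let L := (buckets.headD []).length          -- len(buckets[0]) if buckets else 0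
  let hdr := if 0 < L then
      PySem.List.pyRepeat (table.headD [])
        (-(PySem.Int.floordiv (-(L : Int)) ((table.headD []).length : Int)))
    else []
  let width := hdr.length
  (hdr :: buckets).map (fun r => r ++ List.replicate (width - r.length) "")

-- ===== PRECONDITION & SPEC =====
-- Pre_ excludes exactly the inputs on which Python A raises (max_rows < 1: ZeroDivisionError or IndexError)
-- or diverges (first row empty while some row at position ≡ 1 (mod max_rows) is nonempty: the while loop never ends).
def Pre_break_table (table : List (List String)) (max_rows : Int) : Prop :=
  1 ≤ max_rows ∧ (table.headD [] = [] →
    ∀ i ∈ List.range table.tail.length, i % max_rows.toNat = 0 → table.tail.getD i [] = [])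
instance (table : List (List String)) (max_rows : Int) : Decidable (Pre_break_table table max_rows) := by
  unfold Pre_break_table; infer_instance

def pvWitness_break_table : List (List String) × Int := ([[ "h" ], ["a", "b"], ["c"]], 2)

def Spec_break_table (table : List (List String)) (max_rows : Int) (out : List (List String)) : Prop := out = break_table_alt table max_rows
instance (table : List (List String)) (max_rows : Int) (out : List (List String)) : Decidable (Spec_break_table table max_rows out) := by unfold Spec_break_table; infer_instance

-- ===== CLAIM (what is proved, stated in full; the proofs are below) =====
def Claim_equal_break_table : Prop := ∀ (table : List (List String)) (max_rows : Int), Dom_break_table table max_rows → Pre_break_table table max_rows → Spec_break_table table max_rows (break_table table max_rows)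

-- ===== LEMMAS AND PROOFS =====

theorem pvEvery_nil (m : Nat) : pvEvery m [] = [] := by rw [pvEvery]
theorem pvEvery_cons (m : Nat) (r : List String) (rs : List (List String)) :
    pvEvery m (r :: rs) = r :: pvEvery m (rs.drop (m - 1)) := by rw [pvEvery]

-- countdown-style picker: pvPickc m c rs keeps the elements of rs at indices c, c+m, c+2m, …
def pvPickc (m : Nat) : Nat → List (List String) → List (List String)
  | _, [] => []
  | 0, r :: rs => r :: pvPickc m (m - 1) rs
  | _c+1, _r :: rs => pvPickc m _c rs

theorem pvPickc_eq_every (m : Nat) (hm : 1 ≤ m) :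
    ∀ (rs : List (List String)) (c : Nat), c < m → pvPickc m c rs = pvEvery m (rs.drop c) := by
  intro rs
  induction rs with
  | nil => intro c _; cases c <;> simp [pvPickc, pvEvery_nil]
  | cons r rs ih =>
    intro c hc
    cases c with
    | zero => rw [pvPickc, List.drop_zero, pvEvery_cons, ih (m - 1) (by omega)]
    | succ c => simpa [pvPickc] using ih c (by omega)

theorem pvScat_length (mI : Int) (ps : List (Int × List String)) (rt : List (List String)) :
    (ps.foldl (pvScatA mI) rt).length = rt.length := by
  induction ps generalizing rt with
  | nil => rfl
  | cons p ps ih => simp [List.foldl, ih, pvScatA, PySem.List.length_pySetD]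

theorem pvGetD_set_self (l : List (List String)) (n : Nat) (x : List String) (h : n < l.length) :
    (l.set n x).getD n [] = x := by
  simp [List.getD_eq_getElem?_getD, List.getElem?_set_self h]

theorem pvGetD_set_ne (l : List (List String)) (n k : Nat) (x : List String) (h : n ≠ k) :
    (l.set n x).getD k [] = l.getD k [] := by
  simp [List.getD_eq_getElem?_getD, List.getElem?_set_ne h]

theorem pvCountdown (mI : Int) (hpos : 0 < mI) (k : Nat) (s : Int) (_hk : (k : Int) < mI) :
    ((k : Int) - (s + 1)) % mI =
      (if ((k : Int) - s) % mI = 0 then mI - 1 else ((k : Int) - s) % mI - 1) := by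
  have h1 : ((k : Int) - (s + 1)) % mI = (((k : Int) - s) % mI - 1) % mI := by
    conv_lhs => rw [show (k : Int) - (s + 1) = ((k : Int) - s) - 1 by ring]
    rw [Int.sub_emod ((k : Int) - s) 1 mI, Int.sub_emod (((k : Int) - s) % mI) 1 mI,
      Int.emod_emod_of_dvd _ dvd_rfl]
  have hD0 : 0 ≤ ((k : Int) - s) % mI := Int.emod_nonneg _ (by omega)
  have hDlt : ((k : Int) - s) % mI < mI := Int.emod_lt_of_pos _ hpos
  rw [h1]
  split_ifs with h0
  · rw [h0]
    rw [show (0 : Int) - 1 = (mI - 1) + mI * (-1) by ring, Int.add_mul_emod_self_left,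
      Int.emod_eq_of_lt (by omega) (by omega)]
  · rw [Int.emod_eq_of_lt (by omega) (by omega)]

theorem pvScat_getD (mI : Int) (hpos : 0 < mI) :
    ∀ (rows : List (List String)) (s : Int) (rt : List (List String)), 0 ≤ s → rt.length = mI.toNat →
    ∀ k : Nat, k < mI.toNat →
    ((PySem.List.enumerate rows s).foldl (pvScatA mI) rt).getD k [] =
      rt.getD k [] ++ (pvPickc mI.toNat ((((k : Int) - s) % mI).toNat) rows).flatten := by
  intro rows
  induction rows with
  | nil =>
    intro s rt _ _ k _
    cases h : (((k : Int) - s) % mI).toNat <;>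
      simp [PySem.List.enumerate_nil, pvPickc]
  | cons r rows ih =>
    intro s rt hs hlen k hk
    rw [PySem.List.enumerate_cons, List.foldl_cons]
    have hmod : PySem.Int.mod s mI = s % mI := PySem.Int.mod_eq_emod_of_pos hpos
    have hj0 : (0 : Int) ≤ s % mI := Int.emod_nonneg _ (by omega)
    have hjlt : s % mI < mI := Int.emod_lt_of_pos _ hpos
    have hset : pvScatA mI rt (s, r) = rt.set (s % mI).toNat ((rt.getD (s % mI).toNat []) ++ r) := by
      simp [pvScatA, hmod, PySem.List.pySetD_of_nonneg _ _ hj0, PySem.List.pyGetD_of_nonneg _ _ hj0]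
    have hkI : (k : Int) < mI := by omega
    rw [hset, ih (s + 1) _ (by omega) (by simp [hlen]) k hk, pvCountdown mI hpos k s hkI]
    by_cases hcase : ((k : Int) - s) % mI = 0
    · have hkk : (k : Int) % mI = s % mI := Int.emod_eq_emod_iff_emod_sub_eq_zero.mpr hcase
      have hsk : s % mI = (k : Int) := by rw [← hkk, Int.emod_eq_of_lt (by omega) hkI]
      have htn : (s % mI).toNat = k := by omega
      rw [if_pos hcase, hcase]
      rw [show ((0 : Int)).toNat = 0 from rfl, show ((mI - 1).toNat) = mI.toNat - 1 by omega]
      rw [pvPickc, htn, pvGetD_set_self _ _ _ (by omega)]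
      simp [List.append_assoc]
    · have hne : (s % mI).toNat ≠ k := by
        intro hEq
        apply hcase
        rw [← Int.emod_eq_emod_iff_emod_sub_eq_zero, Int.emod_eq_of_lt (by omega) hkI]
        omega
      rw [if_neg hcase]
      have hDpos : 0 < ((k : Int) - s) % mI := by
        rcases lt_or_eq_of_le (Int.emod_nonneg ((k : Int) - s) (by omega : mI ≠ 0)) with h | h
        · exact h
        · exact absurd h.symm hcase
      rw [show (((k : Int) - s) % mI - 1).toNat = (((k : Int) - s) % mI).toNat - 1 by omega,
        show (((k : Int) - s) % mI).toNat = ((((k : Int) - s) % mI).toNat - 1) + 1 by omega,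
        pvPickc, pvGetD_set_ne _ _ _ _ hne]
      simp

theorem pvEvery_mem (m : Nat) (hm : 1 ≤ m) :
    ∀ (rs : List (List String)) (x : List String), x ∈ pvEvery m rs →
      ∃ i, i < rs.length ∧ i % m = 0 ∧ rs.getD i [] = x := by
  intro rs
  induction rs using pvEvery.induct m with
  | case1 => intro x hx; rw [pvEvery_nil] at hx; simp at hx
  | case2 r rs ih =>
    intro x hx
    rw [pvEvery_cons] at hx
    rcases List.mem_cons.mp hx with h | h
    · exact ⟨0, by simp, by simp, by simp [h.symm]⟩
    · obtain ⟨i, hi, him, hget⟩ := ih x h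
      have hlen : (rs.drop (m - 1)).length = rs.length - (m - 1) := List.length_drop
      rw [hlen] at hi
      have hlen2 : (r :: rs).length = rs.length + 1 := by simp
      refine ⟨i + m, by omega, by simpa [Nat.add_mod_right] using him, ?_⟩
      rw [← hget]
      rw [List.getD_eq_getElem?_getD, List.getD_eq_getElem?_getD, List.getElem?_drop]
      rw [show i + m = ((m - 1) + i) + 1 by omega, List.getElem?_cons_succ]

theorem pvRepLen (j : Nat) (row0 : List String) :
    (List.replicate j row0).flatten.length = j * row0.length := by
  induction j with
  | zero => simp
  | succ j ih => rw [List.replicate_succ, List.flatten_cons, List.length_append, ih]; ring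

theorem pvRepSucc (j : Nat) (row0 : List String) :
    (List.replicate (j + 1) row0).flatten = (List.replicate j row0).flatten ++ row0 := by
  rw [List.replicate_succ', List.flatten_append]; simp

theorem pvHdrA_run (row0 : List String) (L : Nat) (hh : 0 < row0.length) :
    ∀ (fuel j : Nat), (L + row0.length - 1) / row0.length ≤ j + fuel →
      pvHdrA row0 L fuel (List.replicate j row0).flatten =
        (List.replicate (max j ((L + row0.length - 1) / row0.length)) row0).flatten := by
  set h := row0.length with hhdef
  set n := (L + h - 1) / h with hn
  have t1 : n * h ≤ L + h - 1 := Nat.div_mul_le_self _ _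
  have t2 : L + h - 1 < (n + 1) * h := (Nat.div_lt_iff_lt_mul hh).mp (Nat.lt_succ_self _)
  rw [Nat.add_mul, one_mul] at t2
  have key1 : L ≤ n * h := by omega
  have key2 : ∀ j, j < n → j * h < L := by
    intro j hj
    have h1 : j * h ≤ (n - 1) * h := Nat.mul_le_mul_right _ (by omega)
    have h2 : (n - 1) * h + h = n * h := by rw [← Nat.succ_mul]; congr 1; omega
    have h4 : 1 * h ≤ n * h := Nat.mul_le_mul_right _ (by omega)
    rw [one_mul] at h4
    omega
  have key3 : ∀ j, L ≤ j * h → n ≤ j := by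
    intro j hj
    by_contra hlt
    exact absurd (key2 j (by omega)) (by omega)
  intro fuel
  induction fuel with
  | zero =>
    intro j hjn
    rw [pvHdrA, Nat.max_eq_left (by omega)]
  | succ fuel ih =>
    intro j hjn
    rw [pvHdrA]
    by_cases hc : (List.replicate j row0).flatten.length < L
    · rw [if_pos hc]
      rw [pvRepLen, ← hhdef] at hc
      have hjlt : j < n := by
        by_contra hge
        have : n * h ≤ j * h := Nat.mul_le_mul_right _ (by omega)
        omega
      rw [← pvRepSucc, ih (j + 1) (by omega)]
      rw [Nat.max_eq_right (by omega : j + 1 ≤ n), Nat.max_eq_right (by omega : j ≤ n)]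
    · rw [if_neg hc]
      rw [pvRepLen, ← hhdef] at hc
      have := key3 j (by omega)
      rw [Nat.max_eq_left (by omega)]

theorem pvHeadD_getD (l : List (List String)) : l.headD [] = l.getD 0 [] := by
  cases l <;> rfl

-- ===== VERDICT (by name: the statement is the Claim_ definition above) =====
theorem pvBucket0 (table : List (List String)) (m : Nat) (hm : 1 ≤ m) :
    ((List.range m).map (fun k => (pvEvery m (table.drop (1 + k))).flatten)).getD 0 [] =
      (pvEvery m table.tail).flatten := by
  rw [List.getD_eq_getElem?_getD, List.getElem?_map, List.getElem?_range (by omega : 0 < m)]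
  simp [← List.drop_one]

theorem break_table_spec : Claim_equal_break_table := by
  unfold Claim_equal_break_table
  intro table max_rows _ hpre
  obtain ⟨hm1, hdiv⟩ := hpre
  unfold Spec_break_table
  have hmpos : 0 < max_rows := by omega
  have hm1' : 1 ≤ max_rows.toNat := by omega
  simp only [break_table, break_table_alt]
  -- the scattered bucket list of A equals the gathered bucket list of B
  have hlenA : ((PySem.List.enumerate table.tail 0).foldl (pvScatA max_rows)
      (List.replicate max_rows.toNat [])).length = max_rows.toNat := by
    rw [pvScat_length]; simp
  have hbuck : (PySem.List.enumerate table.tail 0).foldl (pvScatA max_rows)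
        (List.replicate max_rows.toNat []) =
      (List.range max_rows.toNat).map
        (fun k => (pvEvery max_rows.toNat (table.drop (1 + k))).flatten) := by
    apply List.ext_getElem (by simp [hlenA])
    intro k hk1 hk2
    have hkm : k < max_rows.toNat := by simpa [hlenA] using hk1
    have hchar := pvScat_getD max_rows hmpos table.tail 0 (List.replicate max_rows.toNat [])
      le_rfl (by simp) k hkm
    have hmodk : (((k : Int) - 0) % max_rows).toNat = k := by
      rw [sub_zero, Int.emod_eq_of_lt (by omega) (by omega)]
      omega
    rw [hmodk, pvPickc_eq_every max_rows.toNat hm1' table.tail k hkm] at hchar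
    rw [← List.getD_eq_getElem (d := []) (hn := hk1), ← List.getD_eq_getElem (d := []) (hn := hk2), hchar]
    simp [List.getD_eq_getElem?_getD, List.getElem?_map, List.getElem?_range hkm,
      ← List.drop_one, List.drop_drop, Nat.add_comm]
  rw [hbuck]
  simp only [pvHeadD_getD]
  -- the header of A equals the closed-form header of B
  have hhead : pvHdrA (table.getD 0 [])
      ((((List.range max_rows.toNat).map
          (fun k => (pvEvery max_rows.toNat (table.drop (1 + k))).flatten)).getD 0 []).length)
      ((((List.range max_rows.toNat).map
          (fun k => (pvEvery max_rows.toNat (table.drop (1 + k))).flatten)).getD 0 []).length) [] =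
      (if 0 < (((List.range max_rows.toNat).map
          (fun k => (pvEvery max_rows.toNat (table.drop (1 + k))).flatten)).getD 0 []).length then
        PySem.List.pyRepeat (table.getD 0 [])
          (-(PySem.Int.floordiv
              (-(((((List.range max_rows.toNat).map
                  (fun k => (pvEvery max_rows.toNat (table.drop (1 + k))).flatten)).getD 0 []).length : Int)))
              (((table.getD 0 []).length : Int))))
      else []) := by
    rw [pvBucket0 table max_rows.toNat hm1']
    set L := ((pvEvery max_rows.toNat table.tail).flatten).length with hLdef
    by_cases hL : 0 < L
    · rw [if_pos hL]
      -- the first row is nonempty (otherwise A's while loop would diverge, excluded by Pre_)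
      have hh : 0 < (table.getD 0 []).length := by
        by_contra hz
        have hnil : table.getD 0 [] = [] := by
          cases htab : table.getD 0 [] with
          | nil => rfl
          | cons a b => rw [htab] at hz; simp at hz
        have hnonnil : (pvEvery max_rows.toNat table.tail).flatten ≠ [] := by
          intro hno
          rw [hLdef, hno] at hL
          simp at hL
        have hex : ∃ row ∈ pvEvery max_rows.toNat table.tail, row ≠ [] := by
          by_contra hall
          push Not at hall
          exact hnonnil (List.flatten_eq_nil_iff.mpr hall)
        obtain ⟨row, hrmem, hrne⟩ := hex
        obtain ⟨i, hi, him, hget⟩ := pvEvery_mem max_rows.toNat hm1' table.tail row hrmem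
        have := hdiv (by rw [pvHeadD_getD]; exact hnil) i (List.mem_range.mpr hi) him
        rw [this] at hget
        exact hrne hget.symm
      set h := (table.getD 0 []).length with hhdef
      set n := (L + h - 1) / h with hn
      -- arithmetic facts about the ceiling n
      have t1 : n * h ≤ L + h - 1 := Nat.div_mul_le_self _ _
      have t2 : L + h - 1 < (n + 1) * h := (Nat.div_lt_iff_lt_mul hh).mp (Nat.lt_succ_self _)
      rw [Nat.add_mul, one_mul] at t2
      have key1 : L ≤ n * h := by omega
      have hn1 : 1 ≤ n := by
        rw [hn, Nat.le_div_iff_mul_le hh, one_mul]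
        omega
      have key2 : (n - 1) * h < L := by
        have h2 : (n - 1) * h + h = n * h := by rw [← Nat.succ_mul]; congr 1; omega
        omega
      have hnL : n ≤ 0 + L := by
        have hmono : (L + h - 1) / h ≤ ((h - 1) + h * L) / h :=
          Nat.div_le_div_right (by have := Nat.le_mul_of_pos_left L hh; omega)
        rw [Nat.add_mul_div_left _ _ hh] at hmono
        have : (h - 1) / h = 0 := Nat.div_eq_of_lt (by omega)
        omega
      -- A's while loop computes exactly n copies of the first row
      have hA := pvHdrA_run (table.getD 0 []) L hh L 0 (by rw [← hhdef, ← hn]; exact hnL)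
      rw [← hhdef, ← hn] at hA
      simp only [List.replicate_zero, List.flatten_nil] at hA
      rw [Nat.max_eq_right (by omega)] at hA
      rw [hA]
      -- B's ceiling division is the same n
      have hq : -(PySem.Int.floordiv (-(L : Int)) ((h : Int))) = (n : Int) := by
        rw [PySem.Int.neg_floordiv_neg_eq_iff_of_pos (by omega : (0 : Int) < (h : Int))]
        constructor
        · have : ((n : Int) - 1) = ((n - 1 : Nat) : Int) := by omega
          rw [this]
          exact_mod_cast key2
        · exact_mod_cast key1
      rw [hq]
      simp [PySem.List.pyRepeat]
    · rw [if_neg hL]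
      have : L = 0 := by omega
      rw [this, pvHdrA]
  rw [hhead]
  simp only [List.getD_cons_zero]
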